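-- pv_equiv track=rewrite | github.com/felipepimentel/pepperpy-ai | scripts/improvements/standardize_docs.py | fix_docstring_format
-- ===== SOURCE A (Python) =====
-- def fix_docstring_format(docstring: str) -> str:
--     """
--     Corrige o formato de uma docstring.
--
--     Args:
--         docstring: Docstring a ser corrigida
--
--     Returns:
--         Docstring corrigida
--     """
--     lines = docstring.split("\n")
--
--     # Corrigir primeira linha (começar com maiúscula e terminar com ponto)
--     if lines and lines[0]:
--         # Começar com maiúscula
--         if not lines[0][0].isupper():
--             lines[0] = lines[0][0].upper() + lines[0][1:]
--
--         # Terminar com ponto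
--         if not lines[0].endswith("."):
--             lines[0] += "."
--
--     # Corrigir seções Args/Returns/Raises
--     for i, line in enumerate(lines):
--         if line.strip() in ("Args:", "Returns:", "Raises:"):
--             # Verificar se a seção está no formato correto
--             if i > 0 and lines[i - 1].strip() != "":
--                 # Adicionar linha em branco antes da seção
--                 lines.insert(i, "")
--                 # Ajustar índice
--                 i += 1
--
--     return "\n".join(lines)
-- ===== SOURCE B (Python) =====
-- def _fix_first(line):
--     if not line:
--         return line
--     fixed = line if line[0].isupper() else line[0].upper() + line[1:]
--     return fixed if fixed.endswith(".") else fixed + "."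
--
--
-- def fix_docstring_format(docstring: str) -> str:
--     lines = docstring.split("\n")
--     lines[0] = _fix_first(lines[0])
--     out = []
--     for line in lines:
--         if line.strip() in ("Args:", "Returns:", "Raises:") and out and out[-1].strip() != "":
--             out.append("")
--         out.append(line)
--     return "\n".join(out)
-- ===== Notes on version B (the rewrite author's own statement) =====
-- stated objective: simpler
-- what changed: B replaces A's insert-into-the-list-while-enumerating-it loop by a single pass that builds a fresh output list (appending a blank line before a section header when the last appended line is non-blank), and factors the first-line fix into a helper of conditional expressions.
import Mathlib
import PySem

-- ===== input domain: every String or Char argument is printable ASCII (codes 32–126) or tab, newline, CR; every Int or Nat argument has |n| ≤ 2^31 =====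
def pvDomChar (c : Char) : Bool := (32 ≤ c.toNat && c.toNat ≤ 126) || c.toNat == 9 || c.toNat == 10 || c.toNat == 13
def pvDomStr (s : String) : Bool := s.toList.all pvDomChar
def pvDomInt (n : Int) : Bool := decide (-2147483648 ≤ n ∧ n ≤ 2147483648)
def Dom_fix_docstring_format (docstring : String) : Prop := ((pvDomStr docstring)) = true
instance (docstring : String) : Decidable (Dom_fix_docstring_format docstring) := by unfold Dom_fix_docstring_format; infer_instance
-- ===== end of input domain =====

-- B builds a fresh output list in one pass instead of A's insert-into-the-list-while-enumerating loop,
-- and factors the first-line fix into a helper of conditional expressions (objective: simpler).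


-- shared by both ports: `line.strip() in ("Args:", "Returns:", "Raises:")`, written identically in A and B
def pvIsSection (line : String) : Bool :=
  PySem.Str.strip line == "Args:" || PySem.Str.strip line == "Returns:" || PySem.Str.strip line == "Raises:"

-- ===== PORT A =====
-- `if lines and lines[0]: …` first-line fix, on the head of the (never-empty) split list
def pvFixFirstA (lines : List String) : List String :=
  match lines with
  | [] => []
  | l0 :: rest =>
    match l0.toList with
    | [] => l0 :: rest                 -- `lines[0]` falsy: no change
    | c :: cs =>
      -- `if not lines[0][0].isupper(): lines[0] = lines[0][0].upper() + lines[0][1:]`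
      let l1 := if ¬ PySem.Chars.isupper c then PySem.Chars.upperChar c :: cs else c :: cs
      -- `if not lines[0].endswith("."): lines[0] += "."`
      let l2 := if ¬ PySem.Chars.endswith l1 ['.'] then l1 ++ ['.'] else l1
      String.ofList l2 :: rest

-- `for i, line in enumerate(lines): …` over the LIVE list (Python's enumerate reads the mutated list
-- by index); fuel 2*len+1 bounds the iterations: each insertion adds one element but the very next
-- step skips past the re-seen header, so the loop takes at most 2*len+1 steps.
def pvLoopA (lines : List String) (i : Nat) (fuel : Nat) : List String :=
  match fuel with
  | 0 => lines
  | fuel + 1 =>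
    match lines[i]? with
    | none => lines
    | some line =>
      -- `lines[i-1]` is only read when i > 0, so the `.getD ""` default is never seen
      if pvIsSection line && decide (0 < i) && (PySem.Str.strip (lines.getD (i-1) "") != "") then
        pvLoopA (PySem.List.insert lines (i : Int) "") (i+1) fuel
      else
        pvLoopA lines (i+1) fuel

def fix_docstring_format (docstring : String) : String :=
  let lines := (PySem.Str.split? docstring "\n").getD []   -- sep "\n" ≠ "": split? is always some
  let lines := pvFixFirstA lines
  let lines := pvLoopA lines 0 (2 * lines.length + 1)
  PySem.Str.join "\n" lines

-- ===== PORT B =====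
def pvFixFirstB (line : String) : String :=
  match line.toList with
  | [] => line
  | c :: cs =>
    let fixed := if PySem.Chars.isupper c then c :: cs else PySem.Chars.upperChar c :: cs
    String.ofList (if PySem.Chars.endswith fixed ['.'] then fixed else fixed ++ ['.'])

-- `out[-1]` is only read when out is non-empty, so the getLastD default is never seen
def pvStepB (out : List String) (line : String) : List String :=
  if pvIsSection line && !out.isEmpty && (PySem.Str.strip (out.getLastD "") != "") then
    out ++ ["", line]
  else
    out ++ [line]

def fix_docstring_format_alt (docstring : String) : String :=
  let lines := (PySem.Str.split? docstring "\n").getD []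
  let lines := match lines with
    | [] => []
    | l0 :: rest => pvFixFirstB l0 :: rest
  PySem.Str.join "\n" (lines.foldl pvStepB [])

-- ===== PRECONDITION & SPEC =====
def Spec_fix_docstring_format (docstring : String) (out : String) : Prop := out = fix_docstring_format_alt docstring
instance (docstring : String) (out : String) : Decidable (Spec_fix_docstring_format docstring out) := by unfold Spec_fix_docstring_format; infer_instance

-- ===== CLAIM (what is proved, stated in full; the proofs are below) =====
def Claim_equal_fix_docstring_format : Prop := ∀ (docstring : String), Dom_fix_docstring_format docstring → Spec_fix_docstring_format docstring (fix_docstring_format docstring)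

-- ===== LEMMAS AND PROOFS =====

lemma pvFixFirst_eq (l0 : String) (rest : List String) :
    pvFixFirstA (l0 :: rest) = pvFixFirstB l0 :: rest := by
  unfold pvFixFirstA pvFixFirstB
  cases h : l0.toList with
  | nil => simp only [h]
  | cons c cs =>
    simp only [h]
    by_cases hu : PySem.Chars.isupper c = true
    · by_cases he : PySem.Chars.endswith (c :: cs) ['.'] = true <;> simp [hu, he]
    · by_cases he : PySem.Chars.endswith (PySem.Chars.upperChar c :: cs) ['.'] = true <;>
        simp [hu, he]

lemma pvLoop_eq (rest : List String) (out : List String) (fuel : Nat)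
    (hf : 2 * rest.length + 1 ≤ fuel) :
    pvLoopA (out ++ rest) out.length fuel = rest.foldl pvStepB out := by
  induction rest generalizing out fuel with
  | nil =>
    obtain ⟨f, rfl⟩ : ∃ f, fuel = f + 1 := ⟨fuel - 1, by omega⟩
    simp [pvLoopA]
  | cons l rs ih =>
    obtain ⟨f, rfl⟩ : ∃ f, fuel = f + 2 := ⟨fuel - 2, by simp at hf; omega⟩
    have hget : (out ++ l :: rs)[out.length]? = some l := by
      rw [List.getElem?_append_right (le_refl _)]; simp
    rw [pvLoopA]
    simp only [hget]
    -- A's guard over the live list equals B's guard over the built prefix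
    have hcond : (pvIsSection l && decide (0 < out.length)
          && (PySem.Str.strip ((out ++ l :: rs).getD (out.length - 1) "") != ""))
        = (pvIsSection l && !out.isEmpty && (PySem.Str.strip (out.getLastD "") != "")) := by
      cases out with
      | nil => simp
      | cons o os =>
        have hpr : ((o :: os) ++ l :: rs).getD ((o :: os).length - 1) ""
            = (o :: os).getLastD "" := by
          simp [List.getD, List.getLastD_eq_getLast?, List.getLast?_eq_getElem?]
          exact List.getElem_append_left (as := o :: os) (bs := l :: rs) (h := by simp)
        rw [hpr]; simp
    rw [hcond]
    by_cases hc : (pvIsSection l && !out.isEmpty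
        && (PySem.Str.strip (out.getLastD "") != "")) = true
    · rw [if_pos hc]
      -- the insertion turns the live list into out ++ "" :: l :: rs
      have hlen : out.length ≤ (out ++ l :: rs).length := by simp
      rw [PySem.List.insert_natCast _ _ _ hlen, List.take_left' rfl, List.drop_left' rfl]
      -- next step re-reads the header; the line before it is now "" so nothing is inserted
      rw [pvLoopA]
      have hget2 : (out ++ "" :: l :: rs)[out.length + 1]? = some l := by
        rw [List.getElem?_append_right (by simp)]; simp
      simp only [hget2]
      have hstrip : PySem.Str.strip "" = "" := by decide
      rw [if_neg (by simp [List.getD, hstrip])]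
      have hre : out ++ "" :: l :: rs = (out ++ ["", l]) ++ rs := by simp
      have hlen2 : out.length + 1 + 1 = (out ++ ["", l]).length := by simp
      rw [hre, hlen2, ih _ _ (by simp at hf ⊢; omega)]
      have hb : pvStepB out l = out ++ ["", l] := by unfold pvStepB; rw [if_pos hc]
      rw [List.foldl_cons, hb]
    · rw [if_neg hc]
      have hre : out ++ l :: rs = (out ++ [l]) ++ rs := by simp
      have hlen2 : out.length + 1 = (out ++ [l]).length := by simp
      rw [hre, hlen2, ih _ _ (by simp at hf ⊢; omega)]
      have hb : pvStepB out l = out ++ [l] := by unfold pvStepB; rw [if_neg hc]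
      rw [List.foldl_cons, hb]

-- ===== VERDICT (by name: the statement is the Claim_ definition above) =====
theorem fix_docstring_format_spec : Claim_equal_fix_docstring_format := by
  intro docstring _
  unfold Spec_fix_docstring_format fix_docstring_format fix_docstring_format_alt
  simp only
  cases hs : (PySem.Str.split? docstring "\n").getD [] with
  | nil =>
    have h := pvLoop_eq [] [] 1 (by simp)
    simpa [pvFixFirstA] using congrArg (PySem.Str.join "\n") h
  | cons l0 rest =>
    rw [pvFixFirst_eq]
    have h := pvLoop_eq (pvFixFirstB l0 :: rest) []
        (2 * (pvFixFirstB l0 :: rest).length + 1) (le_refl _)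
    simp only [List.nil_append, List.length_nil] at h
    rw [h]
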